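-- pv_equiv track=rewrite | github.com/Sneed-Group/wink-browser | browser_engine/network/network_manager.py | _should_block_request
-- ===== SOURCE A (Python) =====
-- def _should_block_request(url: str) -> bool:
--     """
--     Check if a request should be blocked by the ad blocker.
--
--     Args:
--         url: The URL to check
--
--     Returns:
--         True if the request should be blocked, False otherwise
--     """
--     # This is a simplistic implementation
--     # In a real browser, this would check against filter lists
--
--     # Block common ad domains as an example
--     ad_domains = [
--         "ads.", "ad.", "analytics.", "tracker.", "pixel.",
--         "doubleclick.net", "googleadservices.com", "googlesyndication.com",
--         "moatads.com", "adnxs.com"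
--     ]
--
--     # Check if URL contains any ad domains
--     url_lower = url.lower()
--     for domain in ad_domains:
--         if domain in url_lower:
--             return True
--
--     return False
-- ===== SOURCE B (Python) =====
-- AD_DOMAINS = (
--     "ads.", "ad.", "analytics.", "tracker.", "pixel.",
--     "doubleclick.net", "googleadservices.com", "googlesyndication.com",
--     "moatads.com", "adnxs.com",
-- )
--
--
-- def _should_block_request(url: str) -> bool:
--     # Position-major scan: walk the URL once and at each position test
--     # whether any ad-domain pattern starts there, instead of one full
--     # substring search per pattern.
--     low = url.lower()
--     for i in range(len(low)):
--         for d in AD_DOMAINS: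
--             if low.startswith(d, i):
--                 return True
--     return False
-- ===== Notes on version B (the rewrite author's own statement) =====
-- stated objective: alternative
-- what changed: Replaces the pattern-major loop of N full substring-containment searches by a single position-major scan of the lowered URL that tests at each index whether any ad-domain pattern starts there via startswith with an offset.
import Mathlib
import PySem

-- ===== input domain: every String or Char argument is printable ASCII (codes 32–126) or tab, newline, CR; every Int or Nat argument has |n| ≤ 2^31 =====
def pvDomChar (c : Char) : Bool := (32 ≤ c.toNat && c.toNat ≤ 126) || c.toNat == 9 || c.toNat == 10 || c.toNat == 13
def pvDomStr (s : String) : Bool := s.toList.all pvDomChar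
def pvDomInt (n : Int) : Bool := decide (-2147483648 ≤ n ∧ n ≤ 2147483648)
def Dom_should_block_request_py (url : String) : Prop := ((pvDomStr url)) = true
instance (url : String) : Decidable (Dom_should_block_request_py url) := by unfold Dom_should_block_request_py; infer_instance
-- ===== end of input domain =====

-- B replaces A's pattern-major loop of substring searches by a single position-major
-- scan of the lowered URL (startswith at each index); alternative structure, same cost class.

-- the ad-domain literals shared by both sources
def pvAdDomains : List String :=
  ["ads.", "ad.", "analytics.", "tracker.", "pixel.",
   "doubleclick.net", "googleadservices.com", "googlesyndication.com",
   "moatads.com", "adnxs.com"]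

-- ===== PORT A =====
-- A's 'for domain in ad_domains: if domain in url_lower: return True' loop
def pvLoopA : List String → String → Bool
  | [], _ => false
  | d :: rest, low => if PySem.Str.isIn d low then true else pvLoopA rest low

def should_block_request_py (url : String) : Bool :=
  pvLoopA pvAdDomains (PySem.Str.lower url)

-- ===== PORT B =====
-- B's inner 'for d in AD_DOMAINS: if low.startswith(d, i): return True' loop;
-- low.startswith(d, i) with 0 ≤ i is exactly the prefix test on low[i:] (Chars.startswith on drop i)
def pvInnerB : List String → List Char → Bool
  | [], _ => false
  | d :: rest, tail => if PySem.Chars.startswith tail d.toList then true else pvInnerB rest tail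

-- B's outer 'for i in range(len(low))' loop
def pvLoopB (low : List Char) : List Nat → Bool
  | [] => false
  | i :: rest => if pvInnerB pvAdDomains (low.drop i) then true else pvLoopB low rest

def should_block_request_py_alt (url : String) : Bool :=
  let low := (PySem.Str.lower url).toList
  pvLoopB low (List.range low.length)

-- ===== PRECONDITION & SPEC =====
def Spec_should_block_request_py (url : String) (out : Bool) : Prop := out = should_block_request_py_alt url
instance (url : String) (out : Bool) : Decidable (Spec_should_block_request_py url out) := by unfold Spec_should_block_request_py; infer_instance

-- ===== CLAIM (what is proved, stated in full; the proofs are below) =====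
def Claim_equal_should_block_request_py : Prop := ∀ (url : String), Dom_should_block_request_py url → Spec_should_block_request_py url (should_block_request_py url)

-- ===== LEMMAS AND PROOFS =====

theorem pvLoopA_eq_any (ds : List String) (low : String) :
    pvLoopA ds low = ds.any (fun d => PySem.Str.isIn d low) := by
  induction ds with
  | nil => rfl
  | cons d rest ih => simp [pvLoopA, ih]

theorem pvInnerB_eq_any (ds : List String) (tail : List Char) :
    pvInnerB ds tail = ds.any (fun d => PySem.Chars.startswith tail d.toList) := by
  induction ds with
  | nil => rfl
  | cons d rest ih => simp [pvInnerB, ih]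

theorem pvLoopB_eq_any (low : List Char) (is : List Nat) :
    pvLoopB low is = is.any (fun i => pvInnerB pvAdDomains (low.drop i)) := by
  induction is with
  | nil => rfl
  | cons i rest ih => simp [pvLoopB, ih]

theorem pvAdDomains_ne_nil : ∀ d ∈ pvAdDomains, d.toList ≠ [] := by decide

-- a nonempty pattern occurs in s iff it is a prefix of some drop i with i < length
theorem pvIsIn_iff_exists_lt (sub s : List Char) (hsub : sub ≠ []) :
    PySem.Chars.isIn sub s = true ↔ ∃ i < s.length, sub <+: s.drop i := by
  rw [← PySem.Chars.exists_prefix_drop_iff_isIn]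
  constructor
  · rintro ⟨j, hj⟩
    refine ⟨j, ?_, hj⟩
    by_contra h
    push Not at h
    have : s.drop j = [] := List.drop_eq_nil_iff.mpr h
    rw [this] at hj
    exact hsub (List.prefix_nil.mp hj)
  · rintro ⟨i, _, hi⟩; exact ⟨i, hi⟩

-- ===== VERDICT (by name: the statement is the Claim_ definition above) =====
theorem should_block_request_py_spec : Claim_equal_should_block_request_py := by
  intro url _
  unfold Spec_should_block_request_py should_block_request_py should_block_request_py_alt
  rw [pvLoopA_eq_any, pvLoopB_eq_any]
  set low := (PySem.Str.lower url).toList with hlow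
  rw [Bool.eq_iff_iff]
  simp only [List.any_eq_true, List.mem_range, pvInnerB_eq_any,
    PySem.Str.isIn_eq, PySem.Chars.startswith_iff]
  constructor
  · rintro ⟨d, hd, hin⟩
    have := (pvIsIn_iff_exists_lt d.toList low (pvAdDomains_ne_nil d hd)).mp hin
    obtain ⟨i, hi, hpre⟩ := this
    exact ⟨i, hi, d, hd, hpre⟩
  · rintro ⟨i, hi, d, hd, hpre⟩
    exact ⟨d, hd, (pvIsIn_iff_exists_lt d.toList low (pvAdDomains_ne_nil d hd)).mpr ⟨i, hi, hpre⟩⟩
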